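-- pv_equiv track=rewrite | github.com/ferraroroberto/pdf-to-markdown | src/chunker.py | _dedupe_prev_by_repeated_heading
-- ===== SOURCE A (Python) =====
-- _MAX_HEADING_OVERLAP_TAIL_LINES = 160
--
-- def _non_empty_lines(text: str) -> list[str]:
--     return [ln.strip() for ln in text.splitlines() if ln.strip()]
--
-- def _dedupe_prev_by_repeated_heading(prev: str, following: str) -> str:
--     """If *following* starts with a level-1 ``# `` heading that also appears near the
--     end of *prev*, truncate *prev* at the **last** such line so the next chunk
--     owns that section (typical PDF overlap: short tail vs full re-extraction).
--     """
--     next_lines = _non_empty_lines(following)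
--     if not next_lines:
--         return prev
--     first = next_lines[0]
--     # Level-1 only: one leading "#", not "##" or "###".
--     if not first.startswith("# ") or first.startswith("##"):
--         return prev
--     prev_lines = prev.splitlines()
--     if not prev_lines:
--         return prev
--     last_match: int | None = None
--     for i, ln in enumerate(prev_lines):
--         if ln.strip() == first:
--             last_match = i
--     if last_match is None:
--         return prev
--     tail = len(prev_lines) - last_match
--     if tail > _MAX_HEADING_OVERLAP_TAIL_LINES:
--         return prev
--     return "\n".join(prev_lines[:last_match]).rstrip()
-- ===== SOURCE B (Python) =====
-- _MAX_HEADING_OVERLAP_TAIL_LINES = 160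
--
--
-- def _dedupe_prev_by_repeated_heading(prev: str, following: str) -> str:
--     # Find the first non-empty (stripped) line of `following` lazily, no full list.
--     first = None
--     for ln in following.splitlines():
--         s = ln.strip()
--         if s:
--             first = s
--             break
--     if first is None:
--         return prev
--     if not (first.startswith("# ") and not first.startswith("##")):
--         return prev
--     lines = prev.splitlines()
--     n = len(lines)
--     # Scan backward only inside the allowed tail window; the first hit from the
--     # end is the last match, and anything earlier would exceed the window anyway.
--     for back in range(1, min(n, _MAX_HEADING_OVERLAP_TAIL_LINES) + 1):
--         i = n - back
--         if lines[i].strip() == first: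
--             return "\n".join(lines[:i]).rstrip()
--     return prev
-- ===== Notes on version B (the rewrite author's own statement) =====
-- stated objective: alternative
-- what changed: B finds the first non-empty line of `following` lazily (break on first hit) instead of building the full stripped-line list, and replaces A's full forward scan recording the last heading match plus a separate tail-window check by a backward scan that only inspects the last min(n,160) lines and returns at the first hit from the end.
import Mathlib
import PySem

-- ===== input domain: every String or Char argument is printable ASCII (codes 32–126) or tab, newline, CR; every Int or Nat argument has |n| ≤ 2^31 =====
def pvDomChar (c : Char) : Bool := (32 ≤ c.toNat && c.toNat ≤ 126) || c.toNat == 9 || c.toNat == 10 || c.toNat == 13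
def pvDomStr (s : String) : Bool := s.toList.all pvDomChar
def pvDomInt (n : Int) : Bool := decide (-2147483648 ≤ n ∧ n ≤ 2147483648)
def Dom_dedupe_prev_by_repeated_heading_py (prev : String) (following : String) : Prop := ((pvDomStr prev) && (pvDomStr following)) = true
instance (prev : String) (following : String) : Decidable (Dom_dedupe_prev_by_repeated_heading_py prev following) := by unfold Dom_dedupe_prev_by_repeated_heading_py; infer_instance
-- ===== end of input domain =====

-- B replaces A's full stripped-line list and full forward last-match scan by a lazy
-- first-line lookup and a backward scan over only the last min(n,160) lines (alternative decomposition).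

-- ===== PORT A =====
-- [ln.strip() for ln in text.splitlines() if ln.strip()]
def pvNonEmptyLines (text : String) : List String :=
  ((PySem.Str.splitlines text).filter (fun ln => !(PySem.Str.strip ln == ""))).map
    (fun ln => PySem.Str.strip ln)

def dedupe_prev_by_repeated_heading_py (prev : String) (following : String) : String :=
  match pvNonEmptyLines following with
  | [] => prev
  | first :: _ =>
    if !(PySem.Str.startswith first "# ") || PySem.Str.startswith first "##" then prev
    else
      let prev_lines := PySem.Str.splitlines prev
      if prev_lines.isEmpty then prev
      else
        -- for i, ln in enumerate(prev_lines): if ln.strip() == first: last_match = i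
        let last_match := (prev_lines.foldl
          (fun (st : Option Nat × Nat) ln =>
            (if PySem.Str.strip ln == first then some st.2 else st.1, st.2 + 1))
          ((none : Option Nat), 0)).1
        match last_match with
        | none => prev
        | some i =>
          if prev_lines.length - i > 160 then prev
          else PySem.Str.rstrip (PySem.Str.join "\n" (prev_lines.take i))

-- ===== PORT B =====
-- first non-empty stripped line of `following`, with break
def pvAltFirstLine : List String → Option String
  | [] => none
  | ln :: rest =>
    let s := PySem.Str.strip ln
    if s == "" then pvAltFirstLine rest else some s

-- for back in range(1, min(n, 160) + 1): if lines[n-back].strip() == first: return join/rstrip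
def pvAltScan (lines : List String) (first : String) (n : Nat) (back : Nat) (fuel : Nat)
    (prev : String) : String :=
  match fuel with
  | 0 => prev
  | fuel' + 1 =>
    if PySem.Str.strip (lines.getD (n - back) "") == first then
      PySem.Str.rstrip (PySem.Str.join "\n" (lines.take (n - back)))
    else pvAltScan lines first n (back + 1) fuel' prev

def dedupe_prev_by_repeated_heading_py_alt (prev : String) (following : String) : String :=
  match pvAltFirstLine (PySem.Str.splitlines following) with
  | none => prev
  | some first =>
    if PySem.Str.startswith first "# " && !PySem.Str.startswith first "##" then
      let lines := PySem.Str.splitlines prev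
      pvAltScan lines first lines.length 1 (min lines.length 160) prev
    else prev

-- ===== PRECONDITION & SPEC =====
def Spec_dedupe_prev_by_repeated_heading_py (prev : String) (following : String) (out : String) : Prop := out = dedupe_prev_by_repeated_heading_py_alt prev following
instance (prev : String) (following : String) (out : String) : Decidable (Spec_dedupe_prev_by_repeated_heading_py prev following out) := by unfold Spec_dedupe_prev_by_repeated_heading_py; infer_instance

-- ===== CLAIM (what is proved, stated in full; the proofs are below) =====
def Claim_equal_dedupe_prev_by_repeated_heading_py : Prop := ∀ (prev : String) (following : String), Dom_dedupe_prev_by_repeated_heading_py prev following → Spec_dedupe_prev_by_repeated_heading_py prev following (dedupe_prev_by_repeated_heading_py prev following)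

-- ===== LEMMAS AND PROOFS =====

-- B's first-line loop computes the head of A's non-empty-lines list.
theorem pvAltFirstLine_eq (ls : List String) :
    pvAltFirstLine ls
      = ((ls.filter (fun ln => !(PySem.Str.strip ln == ""))).map (fun ln => PySem.Str.strip ln)).head? := by
  induction ls with
  | nil => rfl
  | cons ln rest ih =>
    simp only [pvAltFirstLine, List.filter_cons]
    by_cases h : PySem.Str.strip ln == ""
    · simp [h, ih]
    · simp [h]

-- A's enumerate loop: second component is the running index.
theorem pvLoopA_snd (p : String → Bool) (L : List String) (acc : Option Nat) (k : Nat) :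
    (L.foldl (fun (st : Option Nat × Nat) ln => (if p ln then some st.2 else st.1, st.2 + 1)) (acc, k)).2
      = k + L.length := by
  induction L generalizing acc k with
  | nil => simp
  | cons x t ih => simp [List.foldl_cons, ih]; omega

-- A's enumerate loop computes the LAST matching index = first match of the reversed list.
theorem pvLoopA_fst (p : String → Bool) (L : List String) :
    (L.foldl (fun (st : Option Nat × Nat) ln => (if p ln then some st.2 else st.1, st.2 + 1)) ((none : Option Nat), 0)).1
      = (List.findIdx? p L.reverse).map (fun r => L.length - 1 - r) := by
  induction L using List.reverseRecOn with
  | nil => rfl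
  | append_singleton M x ih =>
    rw [List.foldl_append, List.foldl_cons, List.foldl_nil]
    simp only [List.reverse_append, List.reverse_singleton, List.singleton_append,
      List.findIdx?_cons]
    by_cases hx : p x
    · simp [hx, pvLoopA_snd p M none 0]
    · simp only [hx, Bool.false_eq_true, ite_false]
      rw [ih]
      cases hf : List.findIdx? p M.reverse with
      | none => simp
      | some r =>
        have hr : r < M.length := by
          have := List.findIdx?_eq_some_iff_findIdx_eq.mp hf
          simpa using this.1
        simp only [Option.map_some]
        congr 1
        simp only [List.length_append, List.length_singleton]
        omega

-- "truncate at index i, or keep prev": the common result shape of both programs.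
def pvRes (L : List String) (prev : String) : Option Nat → String
  | none => prev
  | some i => PySem.Str.rstrip (PySem.Str.join "\n" (L.take i))

-- B's backward scan is a findIdx? over a window of the reversed list.
theorem pvAltScan_eq (L : List String) (first prev : String) (fuel : Nat) :
    ∀ back : Nat, 1 ≤ back → back + fuel ≤ L.length + 1 →
    pvAltScan L first L.length back fuel prev
      = pvRes L prev ((List.findIdx? (fun ln => PySem.Str.strip ln == first)
          ((L.reverse.drop (back - 1)).take fuel)).map (fun r => L.length - back - r)) := by
  induction fuel with
  | zero => intro back _ _; simp [pvAltScan, pvRes]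
  | succ fuel' ih =>
    intro back hb hbn
    have hlt : back - 1 < L.reverse.length := by rw [List.length_reverse]; omega
    have hget : L.reverse[back - 1]'hlt = L.getD (L.length - back) "" := by
      rw [List.getElem_reverse, List.getD_eq_getElem]
      · congr 1; omega
      · omega
    have hb1 : back - 1 + 1 = back := by omega
    have hdrop : L.reverse.drop (back - 1) = L.reverse[back - 1]'hlt :: L.reverse.drop back := by
      rw [List.drop_eq_getElem_cons hlt, hb1]
    rw [pvAltScan]
    by_cases hp : PySem.Str.strip (L.getD (L.length - back) "") == first
    · rw [if_pos hp, hdrop, List.take_succ_cons, List.findIdx?_cons, hget, if_pos hp]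
      simp [pvRes]
    · rw [if_neg (by simpa using hp), ih (back + 1) (by omega) (by omega),
        hdrop, List.take_succ_cons, List.findIdx?_cons, hget, if_neg (by simpa using hp)]
      rw [show back + 1 - 1 = back by omega]
      cases hf : List.findIdx? (fun ln => PySem.Str.strip ln == first) ((L.reverse.drop back).take fuel') with
      | none => simp [pvRes]
      | some r =>
        simp only [Option.map_some, pvRes]
        rw [show L.length - (back + 1) - r = L.length - back - (r + 1) from by omega]

-- findIdx? of a prefix keeps exactly the matches below the cut.
theorem pvFindIdx_take (p : String → Bool) (M : List String) (k : Nat) :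
    List.findIdx? p (M.take k)
      = match List.findIdx? p M with
        | none => none
        | some r => if r < k then some r else none := by
  induction M generalizing k with
  | nil => simp
  | cons x t ih =>
    cases k with
    | zero =>
      simp only [List.take_zero, List.findIdx?_nil]
      cases List.findIdx? p (x :: t) <;> simp
    | succ k' =>
      rw [List.take_succ_cons, List.findIdx?_cons, List.findIdx?_cons]
      by_cases hx : p x
      · simp [hx]
      · simp only [hx, Bool.false_eq_true, ite_false]
        rw [ih k']
        cases List.findIdx? p t with
        | none => simp
        | some r =>
          simp only [Option.map_some]
          by_cases hr : r < k'
          · rw [if_pos hr, if_pos (by omega)]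
            rfl
          · rw [if_neg hr, if_neg (by omega)]
            rfl

-- the windowed backward search agrees with "last match overall + tail-window check"
theorem pvCore_eq (L : List String) (first prev : String) (hn : L ≠ []) :
    (match (L.foldl (fun (st : Option Nat × Nat) ln =>
        (if PySem.Str.strip ln == first then some st.2 else st.1, st.2 + 1)) ((none : Option Nat), 0)).1 with
      | none => prev
      | some i => if L.length - i > 160 then prev
          else PySem.Str.rstrip (PySem.Str.join "\n" (L.take i)))
      = pvAltScan L first L.length 1 (min L.length 160) prev := by
  have hlen : 1 ≤ L.length := List.length_pos_of_ne_nil hn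
  rw [pvLoopA_fst (fun ln => PySem.Str.strip ln == first) L,
    pvAltScan_eq L first prev (min L.length 160) 1 (by omega) (by omega)]
  simp only [Nat.sub_self, List.drop_zero]
  rw [pvFindIdx_take]
  cases hf : List.findIdx? (fun ln => PySem.Str.strip ln == first) L.reverse with
  | none => simp [pvRes]
  | some r =>
    have hr : r < L.length := by
      have := List.findIdx?_eq_some_iff_findIdx_eq.mp hf
      simpa using this.1
    simp only [Option.map_some]
    by_cases hwin : r < min L.length 160
    · rw [if_pos hwin]
      simp only [Option.map_some, pvRes]
      rw [if_neg (by omega)]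
    · rw [if_neg hwin]
      simp only [Option.map_none, pvRes]
      rw [if_pos (by omega)]

-- ===== VERDICT (by name: the statement is the Claim_ definition above) =====
theorem dedupe_prev_by_repeated_heading_py_spec : Claim_equal_dedupe_prev_by_repeated_heading_py := by
  intro prev following _
  unfold Spec_dedupe_prev_by_repeated_heading_py
  unfold dedupe_prev_by_repeated_heading_py dedupe_prev_by_repeated_heading_py_alt
  rw [pvAltFirstLine_eq]
  rw [show ((PySem.Str.splitlines following).filter (fun ln => !(PySem.Str.strip ln == ""))).map (fun ln => PySem.Str.strip ln) = pvNonEmptyLines following from rfl]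
  cases hnl : pvNonEmptyLines following with
  | nil => rfl
  | cons first rest =>
    simp only [List.head?_cons]
    by_cases hg : (PySem.Str.startswith first "# " && !PySem.Str.startswith first "##") = true
    · have hg' := hg
      rw [Bool.and_eq_true, Bool.not_eq_true'] at hg'
      have hg1 := hg'.1
      have hg2 := hg'.2
      rw [if_pos hg, if_neg (by rw [hg1, hg2]; simp)]
      set L := PySem.Str.splitlines prev with hL
      by_cases hLe : L.isEmpty
      · have hnil : L = [] := by simpa [List.isEmpty_iff] using hLe
        rw [if_pos hLe, hnil]
        simp [pvAltScan]
      · rw [if_neg hLe]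
        have hnnil : L ≠ [] := by simpa [List.isEmpty_iff] using hLe
        exact pvCore_eq L first prev hnnil
    · have hcond : (!(PySem.Str.startswith first "# ") || PySem.Str.startswith first "##") = true := by
        cases h1 : PySem.Str.startswith first "# " <;>
          cases h2 : PySem.Str.startswith first "##" <;> simp_all
      rw [if_neg hg, if_pos hcond]
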